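-- pv_equiv track=rewrite | github.com/Blueracey/Image_incription | Frontend/Utils/utils.py | get_message_bits
-- ===== SOURCE A (Python) =====
-- def to_binary(char):
--     return format(ord(char), '08b')
--
-- def get_message_bits(message):
--     split = message.strip().split()
--     final_bits = []
--
--     for word in split:
--         for char in word:
--             for bit in to_binary(char):
--                 final_bits.append(int(bit))
--         final_bits.extend([0, 0, 1, 0, 0, 0, 0, 0])  # space delimiter
--
--     return final_bits
-- ===== SOURCE B (Python) =====
-- def _append_bits(code, bits):
--     for k in range(7, -1, -1):
--         bits.append((code >> k) & 1)
--
-- def get_message_bits(message):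
--     # Single pass over the raw characters: a state machine tracks whether we are
--     # inside a word; bits come from arithmetic shifts ((code >> k) & 1), and the
--     # word delimiter is the encoded space emitted at each word end (including
--     # after the last word). No strip/split/format.
--     bits = []
--     in_word = False
--     for c in message:
--         if c.isspace():
--             if in_word:
--                 _append_bits(32, bits)
--                 in_word = False
--         else:
--             _append_bits(ord(c), bits)
--             in_word = True
--     if in_word:
--         _append_bits(32, bits)
--     return bits
-- ===== Notes on version B (the rewrite author's own statement) =====
-- stated objective: alternative
-- what changed: Replaces strip().split() plus three nested loops over zero-padded binary format strings with a single pass over the raw characters driven by an in_word state machine, extracting bits arithmetically with (code >> k) & 1 and emitting the encoded space at each word boundary.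
import Mathlib
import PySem

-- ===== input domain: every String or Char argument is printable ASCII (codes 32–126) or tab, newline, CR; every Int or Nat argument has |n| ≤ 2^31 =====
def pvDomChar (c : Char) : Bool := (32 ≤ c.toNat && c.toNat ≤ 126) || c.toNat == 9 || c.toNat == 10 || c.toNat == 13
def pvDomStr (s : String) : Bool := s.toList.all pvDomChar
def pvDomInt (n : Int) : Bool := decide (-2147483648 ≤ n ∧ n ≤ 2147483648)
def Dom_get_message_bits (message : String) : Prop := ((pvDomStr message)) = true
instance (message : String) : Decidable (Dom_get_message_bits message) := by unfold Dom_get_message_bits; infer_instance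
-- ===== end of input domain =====

-- B replaces A's strip/split plus three nested loops over formatted bit strings by a
-- single pass over the raw characters with an in_word state machine and arithmetic
-- bit extraction ((code >> k) & 1); the delimiter is the encoded space (alternative decomposition).

-- ===== PORT A =====
-- format(ord(char), '08b'): binary digits of the code point, zero-padded to width 8 (exact for code points ≥ 1)
def to_binary (char : Char) : List Char :=
  PySem.Chars.zfill (Nat.toDigits 2 char.toNat) 8

def get_message_bits (message : String) : List Int :=
  let split := PySem.Str.split₀ (PySem.Str.strip message)
  let final_bits : List Int := []
  split.foldl (fun final_bits word =>
    (word.toList.foldl (fun fb char =>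
        (to_binary char).foldl (fun fb bit => fb ++ [((bit.toNat : Int) - 48)]) fb)
      final_bits)
    ++ [0, 0, 1, 0, 0, 0, 0, 0]) final_bits

-- ===== PORT B =====
-- _append_bits(code, bits): for k in range(7,-1,-1): bits.append((code >> k) & 1)
-- (k ranges over 7..0, all nonnegative, so the shift amount k.toNat is exact)
def pvAppendBits (code : Int) (bits : List Int) : List Int :=
  (PySem.List.pyRange 7 (-1) (-1)).foldl
    (fun bits k => bits ++ [PySem.Int.band (code >>> k.toNat) 1]) bits

-- single pass: state (bits, in_word); whitespace ends a word by emitting the encoded space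
def get_message_bits_alt (message : String) : List Int :=
  let st := message.toList.foldl
    (fun (st : List Int × Bool) c =>
      if PySem.Chars.isspace c then
        (if st.2 then (pvAppendBits 32 st.1, false) else st)
      else (pvAppendBits (c.toNat : Int) st.1, true))
    ([], false)
  if st.2 then pvAppendBits 32 st.1 else st.1

-- ===== PRECONDITION & SPEC =====
def Spec_get_message_bits (message : String) (out : List Int) : Prop := out = get_message_bits_alt message
instance (message : String) (out : List Int) : Decidable (Spec_get_message_bits message out) := by unfold Spec_get_message_bits; infer_instance

-- ===== CLAIM (what is proved, stated in full; the proofs are below) =====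
def Claim_equal_get_message_bits : Prop := ∀ (message : String), Dom_get_message_bits message → Spec_get_message_bits message (get_message_bits message)

-- ===== LEMMAS AND PROOFS =====

-- bits of one character, A's shape (zero-padded binary digits mapped to 0/1)
def pvBitsN (n : Nat) : List Int :=
  (PySem.Chars.zfill (Nat.toDigits 2 n) 8).map (fun b => ((b.toNat : Int) - 48))

def pvBits (c : Char) : List Int := pvBitsN c.toNat

-- bits of one character, B's shape (arithmetic shifts)
def pvBitsB (code : Int) : List Int :=
  (PySem.List.pyRange 7 (-1) (-1)).map (fun k => PySem.Int.band (code >>> k.toNat) 1)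

-- B's loop body and finisher, named for the proofs (definitionally those of get_message_bits_alt)
def pvStep (st : List Int × Bool) (c : Char) : List Int × Bool :=
  if PySem.Chars.isspace c then
    (if st.2 then (pvAppendBits 32 st.1, false) else st)
  else (pvAppendBits (c.toNat : Int) st.1, true)

def pvFinish (st : List Int × Bool) : List Int :=
  if st.2 then pvAppendBits 32 st.1 else st.1

-- the flat bit stream of a word list, the common target of both proofs
def pvF0 (ws : List (List Char)) : List Int :=
  (ws.flatMap (fun w => w ++ [' '])).flatMap pvBits

theorem alt_eq (message : String) :
    get_message_bits_alt message = pvFinish (message.toList.foldl pvStep ([], false)) := rfl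

theorem foldl_append_singleton {α β : Type} (f : α → β) (l : List α) (acc : List β) :
    l.foldl (fun acc x => acc ++ [f x]) acc = acc ++ l.map f := by
  induction l generalizing acc with
  | nil => simp
  | cons x xs ih => simp [List.foldl_cons, ih]

theorem pvAppendBits_eq (code : Int) (bits : List Int) :
    pvAppendBits code bits = bits ++ pvBitsB code := by
  rw [pvAppendBits, pvBitsB]
  exact foldl_append_singleton _ _ _

theorem pvBitsB_fin : ∀ i : Fin 127, pvBitsB (i.val : Int) = pvBitsN i.val := by decide

theorem pvBitsB_eq_pvBits (c : Char) (h : pvDomChar c = true) :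
    pvBitsB (c.toNat : Int) = pvBits c := by
  have hlt : c.toNat < 127 := by
    simp [pvDomChar] at h; omega
  exact pvBitsB_fin ⟨c.toNat, hlt⟩

theorem pvBitsB_space : pvBitsB 32 = pvBits ' ' := by decide

theorem pvBits_space : pvBits ' ' = [0, 0, 1, 0, 0, 0, 0, 0] := by decide

-- ===== A's side: the nested loops flatten to pvF0 over split₀(strip) =====

theorem inner_char_foldl (word : List Char) (acc : List Int) :
    word.foldl (fun fb char =>
        (to_binary char).foldl (fun fb bit => fb ++ [((bit.toNat : Int) - 48)]) fb) acc
      = acc ++ word.flatMap pvBits := by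
  induction word generalizing acc with
  | nil => simp
  | cons c cs ih =>
    rw [List.foldl_cons, foldl_append_singleton, ih]
    simp [pvBits, pvBitsN, to_binary]

theorem word_foldl (ws : List String) (acc : List Int) :
    ws.foldl (fun final_bits word =>
      (word.toList.foldl (fun fb char =>
          (to_binary char).foldl (fun fb bit => fb ++ [((bit.toNat : Int) - 48)]) fb)
        final_bits)
      ++ [0, 0, 1, 0, 0, 0, 0, 0]) acc
      = acc ++ pvF0 (ws.map String.toList) := by
  induction ws generalizing acc with
  | nil => simp [pvF0]
  | cons w ws ih =>
    rw [List.foldl_cons, inner_char_foldl, ih]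
    simp [pvF0, pvBits_space]

-- ===== split₀ is insensitive to strip =====

theorem go_acc (l : List Char) : ∀ cur acc,
    PySem.Chars.split₀.go l cur acc = acc.reverse ++ PySem.Chars.split₀.go l cur [] := by
  induction l with
  | nil =>
    intro cur acc
    simp only [PySem.Chars.split₀.go]
    by_cases h : cur.isEmpty <;> simp [h]
  | cons c rest ih =>
    intro cur acc
    simp only [PySem.Chars.split₀.go]
    by_cases hs : PySem.Chars.isspace c <;> simp only [hs, if_true, if_false, ite_true, ite_false]
    · by_cases he : cur.isEmpty <;> simp only [he, ite_true, ite_false]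
      · exact ih [] acc
      · rw [ih [] (cur.reverse :: acc), ih [] [cur.reverse]]
        simp
    · exact ih (c :: cur) acc

theorem go_allspace (ws : List Char) : ∀ cur acc, (∀ c ∈ ws, PySem.Chars.isspace c = true) →
    PySem.Chars.split₀.go ws cur acc = PySem.Chars.split₀.go [] cur acc := by
  induction ws with
  | nil => intro cur acc _; rfl
  | cons c rest ih =>
    intro cur acc h
    have hc : PySem.Chars.isspace c = true := h c (List.mem_cons_self ..)
    have hrest : ∀ c ∈ rest, PySem.Chars.isspace c = true := fun x hx => h x (List.mem_cons_of_mem _ hx)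
    by_cases he : cur.isEmpty
    · conv_lhs => simp only [PySem.Chars.split₀.go]
      rw [hc, if_pos rfl, if_pos he, ih [] acc hrest]
      cases cur with
      | nil => rfl
      | cons _ _ => simp [List.isEmpty] at he
    · conv_lhs => simp only [PySem.Chars.split₀.go]
      rw [hc, if_pos rfl, if_neg he, ih [] (cur.reverse :: acc) hrest]
      simp only [PySem.Chars.split₀.go]
      rw [if_neg he]
      rfl

theorem go_append_spaces (l : List Char) : ∀ ws cur acc, (∀ c ∈ ws, PySem.Chars.isspace c = true) →
    PySem.Chars.split₀.go (l ++ ws) cur acc = PySem.Chars.split₀.go l cur acc := by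
  induction l with
  | nil =>
    intro ws cur acc h
    simpa using go_allspace ws cur acc h
  | cons c rest ih =>
    intro ws cur acc h
    simp only [List.cons_append, PySem.Chars.split₀.go]
    by_cases hs : PySem.Chars.isspace c <;> simp only [hs, ite_true, ite_false]
    · by_cases he : cur.isEmpty <;> simp only [he, ite_true, ite_false]
      · exact ih ws [] acc h
      · exact ih ws [] (cur.reverse :: acc) h
    · exact ih ws (c :: cur) acc h

theorem split₀_rstrip (l : List Char) :
    PySem.Chars.split₀ (PySem.Chars.rstrip l) = PySem.Chars.split₀ l := by
  have hdecomp : PySem.Chars.rstrip l ++ (l.reverse.takeWhile PySem.Chars.isspace).reverse = l := by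
    simp only [PySem.Chars.rstrip]
    rw [← List.reverse_append, List.takeWhile_append_dropWhile, List.reverse_reverse]
  have hsp : ∀ c ∈ (l.reverse.takeWhile PySem.Chars.isspace).reverse, PySem.Chars.isspace c = true := by
    intro c hc
    exact List.mem_takeWhile_imp (List.mem_reverse.mp hc)
  calc PySem.Chars.split₀ (PySem.Chars.rstrip l)
      = PySem.Chars.split₀.go (PySem.Chars.rstrip l ++ (l.reverse.takeWhile PySem.Chars.isspace).reverse) [] [] :=
        (go_append_spaces _ _ [] [] hsp).symm
    _ = PySem.Chars.split₀ l := by rw [hdecomp]; rfl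

theorem split₀_lstrip (l : List Char) :
    PySem.Chars.split₀ (PySem.Chars.lstrip l) = PySem.Chars.split₀ l := by
  induction l with
  | nil => rfl
  | cons c rest ih =>
    by_cases hs : PySem.Chars.isspace c
    · have h1 : PySem.Chars.lstrip (c :: rest) = PySem.Chars.lstrip rest := by
        simp [PySem.Chars.lstrip, List.dropWhile_cons, hs]
      have h2 : PySem.Chars.split₀ (c :: rest) = PySem.Chars.split₀ rest := by
        simp [PySem.Chars.split₀, PySem.Chars.split₀.go, hs]
      rw [h1, ih, h2]
    · simp [PySem.Chars.lstrip, List.dropWhile_cons, hs]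

theorem split₀_strip (l : List Char) :
    PySem.Chars.split₀ (PySem.Chars.strip l) = PySem.Chars.split₀ l := by
  simp [PySem.Chars.strip, split₀_rstrip, split₀_lstrip]

-- ===== B's machine: shift of the accumulated bits, then the main invariant =====

theorem foldl_step_shift (l : List Char) : ∀ bits b,
    l.foldl pvStep (bits, b)
      = (bits ++ (l.foldl pvStep ([], b)).1, (l.foldl pvStep ([], b)).2) := by
  induction l with
  | nil => intro bits b; simp
  | cons c rest ih =>
    intro bits b
    by_cases hs : PySem.Chars.isspace c
    · cases b with
      | true =>
        simp only [List.foldl_cons, pvStep, hs, ite_true, pvAppendBits_eq]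
        simp only [Prod.snd, ite_true, List.nil_append]
        rw [ih (bits ++ pvBitsB 32) false, ih (pvBitsB 32) false]
        simp
      | false =>
        simp only [List.foldl_cons, pvStep, hs, ite_true]
        simp only [Prod.snd, Bool.false_eq_true, ite_false]
        exact ih bits false
    · simp only [List.foldl_cons, pvStep, hs, ite_false, pvAppendBits_eq, List.nil_append,
        Bool.false_eq_true]
      rw [ih (bits ++ pvBitsB (c.toNat : Int)) true, ih (pvBitsB (c.toNat : Int)) true]
      simp

theorem pvFinish_shift (bits : List Int) (st : List Int × Bool) :
    pvFinish (bits ++ st.1, st.2) = bits ++ pvFinish st := by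
  cases h : st.2 <;> simp [pvFinish, h, pvAppendBits_eq]

theorem machine_main (l : List Char) : ∀ cur : List Char,
    (∀ c ∈ l, pvDomChar c = true) →
    cur.reverse.flatMap pvBits ++ pvFinish (l.foldl pvStep ([], !cur.isEmpty))
      = pvF0 (PySem.Chars.split₀.go l cur []) := by
  induction l with
  | nil =>
    intro cur _
    simp only [List.foldl_nil, PySem.Chars.split₀.go]
    cases cur with
    | nil => simp [pvFinish, pvF0]
    | cons c cs =>
      simp only [List.isEmpty, Bool.not_false, pvFinish, ite_true, pvAppendBits_eq,
        List.nil_append, pvBitsB_space, pvF0]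
      simp
  | cons c rest ih =>
    intro cur hdom
    have hd : pvDomChar c = true := hdom c (List.mem_cons_self ..)
    have hrest : ∀ x ∈ rest, pvDomChar x = true := fun x hx => hdom x (List.mem_cons_of_mem _ hx)
    by_cases hs : PySem.Chars.isspace c
    · cases hcur : cur with
      | nil =>
        simp only [List.foldl_cons, pvStep, hs, ite_true, List.isEmpty, Bool.not_true,
          Bool.false_eq_true, ite_false]
        have := ih [] hrest
        simp only [List.reverse_nil, List.flatMap_nil, List.nil_append, List.isEmpty,
          Bool.not_true] at this ⊢
        rw [this]
        simp only [PySem.Chars.split₀.go, hs, ite_true, List.isEmpty]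
      | cons c0 cs =>
        simp only [List.foldl_cons, pvStep, hs, ite_true, List.isEmpty, Bool.not_false,
          pvAppendBits_eq, List.nil_append]
        rw [foldl_step_shift rest (pvBitsB 32) false]
        rw [pvFinish_shift]
        have hgo : PySem.Chars.split₀.go (c :: rest) (c0 :: cs) []
            = [(c0 :: cs).reverse] ++ PySem.Chars.split₀.go rest [] [] := by
          simp only [PySem.Chars.split₀.go, hs, ite_true, List.isEmpty, ite_false]
          rw [go_acc rest [] [(c0 :: cs).reverse]]
          rfl
        rw [hgo]
        have hF : pvF0 ([(c0 :: cs).reverse] ++ PySem.Chars.split₀.go rest [] [])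
            = (c0 :: cs).reverse.flatMap pvBits ++ pvBits ' ' ++ pvF0 (PySem.Chars.split₀.go rest [] []) := by
          simp [pvF0]
        rw [hF]
        have := ih [] hrest
        simp only [List.reverse_nil, List.flatMap_nil, List.nil_append, List.isEmpty,
          Bool.not_true] at this
        rw [← this, pvBitsB_space]
        simp
    · simp only [List.foldl_cons, pvStep, hs, ite_false, pvAppendBits_eq, List.nil_append,
        Bool.false_eq_true]
      rw [pvBitsB_eq_pvBits c hd]
      rw [foldl_step_shift rest (pvBits c) true]
      rw [pvFinish_shift]
      have := ih (c :: cur) hrest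
      simp only [List.isEmpty, Bool.not_false, List.reverse_cons, List.flatMap_append,
        List.flatMap_cons, List.flatMap_nil, List.append_nil] at this
      have hgo : PySem.Chars.split₀.go (c :: rest) cur [] = PySem.Chars.split₀.go rest (c :: cur) [] := by
        simp only [PySem.Chars.split₀.go, hs, ite_false, Bool.false_eq_true]
      rw [hgo, ← this]
      simp

-- ===== VERDICT (by name: the statement is the Claim_ definition above) =====
theorem get_message_bits_spec : Claim_equal_get_message_bits := by
  intro message hdom
  show get_message_bits message = get_message_bits_alt message
  have hdom' : ∀ c ∈ message.toList, pvDomChar c = true := by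
    simpa [Dom_get_message_bits, pvDomStr, List.all_eq_true] using hdom
  -- A's side down to pvF0 over the char-level split₀
  have hA : get_message_bits message
      = pvF0 (PySem.Chars.split₀ message.toList) := by
    simp only [get_message_bits, word_foldl, List.nil_append]
    have hmap : (PySem.Str.split₀ (PySem.Str.strip message)).map String.toList
        = PySem.Chars.split₀ (PySem.Chars.strip message.toList) := by
      simp [PySem.Str.split₀_map_toList, PySem.Str.toList_strip]
    rw [hmap, split₀_strip]
  -- B's side via the machine invariant at cur = []
  have hB : get_message_bits_alt message
      = pvF0 (PySem.Chars.split₀ message.toList) := by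
    rw [alt_eq]
    have := machine_main message.toList [] hdom'
    simpa [PySem.Chars.split₀] using this
  rw [hA, hB]
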